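-- pv_equiv track=rewrite | github.com/unccx/Handwritten_Calculator | handwritten_cal.py | math_expression_generator
-- ===== SOURCE A (Python) =====
-- def math_expression_generator(arr):
--
--     op = {
--             10,   # = "/"
--             11,   # = "+"
--             12,   # = "-"
--             13    # = "*"
--          }
--
--     m_exp = []
--     temp = []
--
--     # 创建一个分隔所有元素的列表
--     for item in arr:
--         if item not in op:
--             temp.append(item)
--         else:
--             m_exp.append(temp)
--             m_exp.append(item)
--             temp = []
--     if temp:
--         m_exp.append(temp)
--
--     # 将元素转换为数字和运算符
--     i = 0
--     num = 0
--     for item in m_exp: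
--         if type(item) == list: # 数字list
--             if not item: # 跳过empty list
--                 m_exp[i] = ""
--                 i = i + 1
--             else:
--                 num_len = len(item)
--                 for digit in item:
--                     num_len = num_len - 1
--                     num = num + ((10 ** num_len) * digit)
--                 m_exp[i] = str(num)
--                 num = 0
--                 i = i + 1
--         else: # 运算符
--             m_exp[i] = str(item)
--             m_exp[i] = m_exp[i].replace("10","/")
--             m_exp[i] = m_exp[i].replace("11","+")
--             m_exp[i] = m_exp[i].replace("12","-")
--             m_exp[i] = m_exp[i].replace("13","*")
--
--             i = i + 1
--
--     # 连接字符串列表，创建数学表达式。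
--     separator = ' '
--     m_exp_str = separator.join(m_exp)
--
--     return (m_exp_str)
-- ===== SOURCE B (Python) =====
-- def math_expression_generator(arr):
--     ops = {10: '/', 11: '+', 12: '-', 13: '*'}
--     out = []
--     temp = []
--     for item in arr:
--         if item in ops:
--             if temp:
--                 num = 0
--                 for d in temp:
--                     num = num * 10 + d
--                 out.append(str(num))
--             else:
--                 out.append("")
--             out.append(ops[item])
--             temp = []
--         else:
--             temp.append(item)
--     if temp:
--         num = 0
--         for d in temp:
--             num = num * 10 + d
--         out.append(str(num))
--     return ' '.join(out)
-- ===== Notes on version B (the rewrite author's own statement) =====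
-- stated objective: simpler
-- what changed: B builds the output strings in one pass with a running digit buffer, an operator dict and Horner evaluation (num = num*10 + d), instead of A's intermediate tagged list followed by a second type()-dispatched pass with per-digit 10**k powers and a chain of string replaces.
import Mathlib
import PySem

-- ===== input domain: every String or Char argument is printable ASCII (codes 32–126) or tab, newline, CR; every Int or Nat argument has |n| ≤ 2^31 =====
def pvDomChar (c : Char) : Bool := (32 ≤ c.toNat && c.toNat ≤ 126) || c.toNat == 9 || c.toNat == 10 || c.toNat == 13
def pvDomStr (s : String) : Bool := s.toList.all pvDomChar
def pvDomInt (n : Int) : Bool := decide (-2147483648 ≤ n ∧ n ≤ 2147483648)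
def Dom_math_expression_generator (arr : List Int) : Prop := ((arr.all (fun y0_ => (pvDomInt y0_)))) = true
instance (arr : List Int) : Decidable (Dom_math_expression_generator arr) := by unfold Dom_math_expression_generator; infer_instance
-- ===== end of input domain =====

-- B replaces A's two-pass build (tagged intermediate list, then a type()-dispatched
-- conversion pass) by a single pass with a digit buffer, a dict of operator symbols
-- and Horner evaluation of the buffered digits; objective: simpler.

-- ===== PORT A =====
-- second-pass conversion of one element of m_exp (A's second for-loop body)
def pvConvA (it : List Int ⊕ Int) : String :=
  match it with
  | Sum.inl l =>
      if l = [] then ""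
      else PySem.Int.toStr
        ((l.foldl (fun (st : Int × Nat) d => (st.1 + (10:Int) ^ (st.2 - 1) * d, st.2 - 1))
          ((0:Int), l.length)).1)
  | Sum.inr item =>
      PySem.Str.replace (PySem.Str.replace (PySem.Str.replace (PySem.Str.replace
        (PySem.Int.toStr item) "10" "/") "11" "+") "12" "-") "13" "*"

-- A's first for-loop body
def pvStepA (st : List (List Int ⊕ Int) × List Int) (item : Int) :
    List (List Int ⊕ Int) × List Int :=
  if item ∉ ([10, 11, 12, 13] : List Int) then (st.1, st.2 ++ [item])
  else (st.1 ++ [Sum.inl st.2, Sum.inr item], [])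

def math_expression_generator (arr : List Int) : String :=
  let st := arr.foldl pvStepA ([], [])
  let m_exp := if st.2 ≠ [] then st.1 ++ [Sum.inl st.2] else st.1
  PySem.Str.join " " (m_exp.map pvConvA)

-- ===== PORT B =====
def pvOps : PySem.Dict Int String :=
  PySem.Dict.ofList [(10, "/"), (11, "+"), (12, "-"), (13, "*")]

-- str(num) where num is the Horner evaluation of the buffered digits
def pvHorner (temp : List Int) : String :=
  PySem.Int.toStr (temp.foldl (fun num d => num * 10 + d) 0)

-- B's single-pass loop body
def pvStepB (st : List String × List Int) (item : Int) : List String × List Int :=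
  match pvOps.get? item with
  | some sym => (st.1 ++ [if st.2 = [] then "" else pvHorner st.2] ++ [sym], [])
  | none => (st.1, st.2 ++ [item])

def math_expression_generator_alt (arr : List Int) : String :=
  let st := arr.foldl pvStepB ([], [])
  let out := if st.2 ≠ [] then st.1 ++ [pvHorner st.2] else st.1
  PySem.Str.join " " out

-- ===== PRECONDITION & SPEC =====
def Spec_math_expression_generator (arr : List Int) (out : String) : Prop := out = math_expression_generator_alt arr
instance (arr : List Int) (out : String) : Decidable (Spec_math_expression_generator arr out) := by unfold Spec_math_expression_generator; infer_instance

-- ===== CLAIM (what is proved, stated in full; the proofs are below) =====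
def Claim_equal_math_expression_generator : Prop := ∀ (arr : List Int), Dom_math_expression_generator arr → Spec_math_expression_generator arr (math_expression_generator arr)

-- ===== LEMMAS AND PROOFS =====

-- positional value Σ 10^(n-1-i) * dᵢ, as a structural recursion
def pvPos : List Int → Int
  | [] => 0
  | d :: ds => (10:Int) ^ ds.length * d + pvPos ds

lemma foldA_pos (l : List Int) : ∀ s : Int,
    (l.foldl (fun (st : Int × Nat) d => (st.1 + (10:Int) ^ (st.2 - 1) * d, st.2 - 1))
      (s, l.length)).1 = s + pvPos l := by
  induction l with
  | nil => intro s; simp [pvPos]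
  | cons d ds ih =>
      intro s
      simp only [List.foldl_cons, List.length_cons, Nat.add_sub_cancel, pvPos]
      rw [ih]; ring

lemma horner_pos (l : List Int) : ∀ acc : Int,
    l.foldl (fun num d => num * 10 + d) acc = acc * (10:Int) ^ l.length + pvPos l := by
  induction l with
  | nil => intro acc; simp [pvPos]
  | cons d ds ih =>
      intro acc
      simp only [List.foldl_cons, List.length_cons, pvPos]
      rw [ih]; ring

lemma conv_inl (l : List Int) (h : l ≠ []) : pvConvA (Sum.inl l) = pvHorner l := by
  simp only [pvConvA, pvHorner, if_neg h, foldA_pos, horner_pos, zero_add, zero_mul]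

-- one flush (what A's second pass makes of a buffered digit list)
def pvFlush (l : List Int) : String := if l = [] then "" else pvHorner l

lemma conv_inl_flush (l : List Int) : pvConvA (Sum.inl l) = pvFlush l := by
  by_cases h : l = []
  · subst h; rfl
  · rw [conv_inl l h, pvFlush, if_neg h]

lemma ops_get_none (item : Int) (h10 : item ≠ 10) (h11 : item ≠ 11)
    (h12 : item ≠ 12) (h13 : item ≠ 13) : pvOps.get? item = none := by
  have hmk : pvOps = PySem.Dict.mk [((10:Int), "/"), (11, "+"), (12, "-"), (13, "*")] := by decide
  rw [hmk]
  simp [PySem.Dict.get?, h10.symm, h11.symm, h12.symm, h13.symm]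

lemma stepB_op (mexp : List (List Int ⊕ Int)) (temp : List Int) (item : Int) (sym : String)
    (hget : pvOps.get? item = some sym) (hsym : pvConvA (Sum.inr item) = sym) :
    pvStepB (mexp.map pvConvA, temp) item
      = ((mexp ++ [Sum.inl temp, Sum.inr item]).map pvConvA, []) := by
  simp [pvStepB, hget, List.map_append, conv_inl_flush, pvFlush, hsym]

lemma main_inv (arr : List Int) : ∀ (mexp : List (List Int ⊕ Int)) (temp : List Int),
    arr.foldl pvStepB (mexp.map pvConvA, temp)
      = ((arr.foldl pvStepA (mexp, temp)).1.map pvConvA, (arr.foldl pvStepA (mexp, temp)).2) := by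
  induction arr with
  | nil => intro mexp temp; rfl
  | cons item rest ih =>
      intro mexp temp
      simp only [List.foldl_cons]
      by_cases h10 : item = 10
      · subst h10
        rw [stepB_op mexp temp 10 "/" (by decide) (by decide), pvStepA]
        simp only [show ¬((10:Int) ∉ ([10,11,12,13] : List Int)) by decide, if_neg,
          not_false_eq_true, ih]
      · by_cases h11 : item = 11
        · subst h11
          rw [stepB_op mexp temp 11 "+" (by decide) (by decide), pvStepA]
          simp only [show ¬((11:Int) ∉ ([10,11,12,13] : List Int)) by decide, if_neg,
            not_false_eq_true, ih]
        · by_cases h12 : item = 12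
          · subst h12
            rw [stepB_op mexp temp 12 "-" (by decide) (by decide), pvStepA]
            simp only [show ¬((12:Int) ∉ ([10,11,12,13] : List Int)) by decide, if_neg,
              not_false_eq_true, ih]
          · by_cases h13 : item = 13
            · subst h13
              rw [stepB_op mexp temp 13 "*" (by decide) (by decide), pvStepA]
              simp only [show ¬((13:Int) ∉ ([10,11,12,13] : List Int)) by decide, if_neg,
                not_false_eq_true, ih]
            · have hget := ops_get_none item h10 h11 h12 h13
              have hstep : pvStepB (mexp.map pvConvA, temp) item
                  = (mexp.map pvConvA, temp ++ [item]) := by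
                simp [pvStepB, hget]
              have hstepA : pvStepA (mexp, temp) item = (mexp, temp ++ [item]) := by
                have : item ∉ ([10,11,12,13] : List Int) := by
                  simp [h10, h11, h12, h13]
                simp [pvStepA, this]
              rw [hstep, hstepA, ih]

-- ===== VERDICT (by name: the statement is the Claim_ definition above) =====
theorem math_expression_generator_spec : Claim_equal_math_expression_generator := by
  intro arr _
  show math_expression_generator arr = math_expression_generator_alt arr
  unfold math_expression_generator math_expression_generator_alt
  have h := main_inv arr [] []
  simp only [List.map_nil] at h
  rw [h]
  by_cases hne : (arr.foldl pvStepA ([], [])).2 = []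
  · simp [hne]
  · simp only [hne, ne_eq, not_false_eq_true, if_pos, List.map_append]
    rw [List.map_cons, List.map_nil, conv_inl_flush, pvFlush, if_neg hne]
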